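-- pv_equiv track=rewrite | github.com/deadcoast/ctx-card | src/ctxcard_gen/utils/validation.py | validate_prefix_free
-- ===== SOURCE A (Python) =====
-- from typing import List, Tuple, Dict, Optional
--
-- def validate_prefix_free(aliases: List[str]) -> Tuple[List[str], List[str]]:
--     """
--     Validate that aliases are prefix-free.
--
--     Args:
--         aliases: List of alias strings
--
--     Returns:
--         Tuple of (valid_aliases, invalid_aliases)
--     """
--     valid = []
--     invalid = []
--
--     for i, alias in enumerate(aliases):
--         is_valid = True
--         for j, other in enumerate(aliases):
--             if i != j:
--                 if alias.startswith(other) or other.startswith(alias):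
--                     is_valid = False
--                     break
--
--         if is_valid:
--             valid.append(alias)
--         else:
--             invalid.append(alias)
--
--     return valid, invalid
-- ===== SOURCE B (Python) =====
-- from typing import List, Tuple
--
-- def validate_prefix_free(aliases: List[str]) -> Tuple[List[str], List[str]]:
--     """Hash-set re-implementation: an alias is invalid iff it is duplicated,
--     it is a proper prefix of some alias, or some alias is a proper prefix of it."""
--     seen = set(aliases)
--     counts = {}
--     for a in aliases:
--         counts[a] = counts.get(a, 0) + 1
--     proper_prefixes = set()
--     for a in aliases:
--         for k in range(len(a)):
--             proper_prefixes.add(a[:k])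
--     valid = []
--     invalid = []
--     for a in aliases:
--         bad = (counts[a] > 1
--                or a in proper_prefixes
--                or any(a[:k] in seen for k in range(len(a))))
--         if bad:
--             invalid.append(a)
--         else:
--             valid.append(a)
--     return valid, invalid
-- ===== Notes on version B (the rewrite author's own statement) =====
-- stated objective: faster
-- what changed: Replaces A's all-pairs enumerate scan (each alias compared with every other via startswith) with one pass that builds a hash set of the aliases, a duplicate counter, and a hash set of all proper prefixes, then classifies each alias by O(len) set lookups.
import Mathlib
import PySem

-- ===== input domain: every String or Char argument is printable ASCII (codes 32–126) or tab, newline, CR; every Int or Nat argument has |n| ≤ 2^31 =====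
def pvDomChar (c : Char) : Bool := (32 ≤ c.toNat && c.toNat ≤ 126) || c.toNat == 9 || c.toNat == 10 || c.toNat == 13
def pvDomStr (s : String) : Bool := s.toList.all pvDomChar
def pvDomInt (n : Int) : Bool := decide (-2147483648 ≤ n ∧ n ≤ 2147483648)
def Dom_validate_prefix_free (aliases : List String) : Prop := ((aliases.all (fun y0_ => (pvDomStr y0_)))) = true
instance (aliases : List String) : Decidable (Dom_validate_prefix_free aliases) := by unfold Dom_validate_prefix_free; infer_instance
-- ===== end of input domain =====

-- B replaces A's all-pairs prefix scan with hash sets of aliases and of their proper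
-- prefixes plus a duplicate counter (objective: faster, asymptotic).

-- ===== PORT A =====
-- inner `for j, other in enumerate(aliases): if i != j: if startswith either way: break`
def pvInnerA (i : Int) (al : String) : List (Int × String) → Bool
  | [] => true
  | (j, other) :: rest =>
    if i ≠ j then
      if PySem.Str.startswith al other || PySem.Str.startswith other al then false
      else pvInnerA i al rest
    else pvInnerA i al rest

def validate_prefix_free (aliases : List String) : List String × List String :=
  let pairs := PySem.List.enumerate aliases
  pairs.foldl
    (fun acc p =>
      if pvInnerA p.1 p.2 pairs then (acc.1 ++ [p.2], acc.2) else (acc.1, acc.2 ++ [p.2]))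
    ([], [])

-- ===== PORT B =====
-- counts[a] = counts.get(a, 0) + 1
def pvCounts (aliases : List String) : PySem.Dict String Int :=
  aliases.foldl (fun d a => d.modify a 0 (fun v => v + 1)) PySem.Dict.empty

-- proper_prefixes.add(a[:k]) for k in range(len(a))
def pvProperPrefixes (aliases : List String) : PySem.Set String :=
  aliases.foldl
    (fun s a =>
      (PySem.List.pyRange 0 (PySem.Str.len a)).foldl
        (fun s k => s.add (PySem.Str.slice a none (some k))) s)
    (PySem.Set.ofList [])

def pvBad (seen : PySem.Set String) (counts : PySem.Dict String Int)
    (prefixes : PySem.Set String) (a : String) : Bool :=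
  decide (1 < counts.getD a 0) || decide (a ∈ prefixes) ||
    (PySem.List.pyRange 0 (PySem.Str.len a)).any
      (fun k => decide (PySem.Str.slice a none (some k) ∈ seen))

def validate_prefix_free_alt (aliases : List String) : List String × List String :=
  let seen := PySem.Set.ofList aliases
  let counts := pvCounts aliases
  let prefixes := pvProperPrefixes aliases
  aliases.foldl
    (fun acc a =>
      if pvBad seen counts prefixes a then (acc.1, acc.2 ++ [a]) else (acc.1 ++ [a], acc.2))
    ([], [])

-- ===== PRECONDITION & SPEC =====
def Spec_validate_prefix_free (aliases : List String) (out : List String × List String) : Prop := out = validate_prefix_free_alt aliases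
instance (aliases : List String) (out : List String × List String) : Decidable (Spec_validate_prefix_free aliases out) := by unfold Spec_validate_prefix_free; infer_instance

-- ===== CLAIM (what is proved, stated in full; the proofs are below) =====
def Claim_equal_validate_prefix_free : Prop := ∀ (aliases : List String), Dom_validate_prefix_free aliases → Spec_validate_prefix_free aliases (validate_prefix_free aliases)

-- ===== LEMMAS AND PROOFS =====

-- x is a strict (proper) prefix of y
def pvStrict (x y : String) : Prop := x.toList <+: y.toList ∧ x.toList.length < y.toList.length

-- an alias is invalid ("bad") iff duplicated, a proper prefix of some alias, or extended by some alias
def pvBadP (aliases : List String) (a : String) : Prop :=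
  1 < aliases.count a ∨ (∃ t ∈ aliases, pvStrict a t) ∨ (∃ t ∈ aliases, pvStrict t a)

lemma pv_slice_iff (x t : String) :
    (∃ k : Int, 0 ≤ k ∧ k < PySem.Str.len t ∧ x = PySem.Str.slice t none (some k)) ↔ pvStrict x t := by
  constructor
  · rintro ⟨k, hk0, hklen, rfl⟩
    have hlen : k.toNat < t.toList.length := by
      simp only [PySem.Str.len] at hklen; omega
    have htl : (PySem.Str.slice t none (some k)).toList = t.toList.take k.toNat := by
      rw [PySem.Str.toList_slice, PySem.Chars.slice_eq_listSlice, PySem.List.slice_to _ hk0]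
    constructor
    · rw [htl]; exact List.take_prefix _ _
    · rw [htl, List.length_take]; omega
  · rintro ⟨hpre, hlt⟩
    refine ⟨(x.toList.length : Int), by omega, ?_, ?_⟩
    · simp only [PySem.Str.len]; omega
    · apply String.toList_injective
      rw [PySem.Str.toList_slice, PySem.Chars.slice_eq_listSlice,
        PySem.List.slice_to _ (by omega : (0:Int) ≤ (x.toList.length : Int))]
      simp only [Int.toNat_natCast]
      exact List.prefix_iff_eq_take.mp hpre

lemma pv_mem_fold_add {f : Int → String} (ks : List Int) (s : PySem.Set String) (x : String) :
    x ∈ ks.foldl (fun s k => s.add (f k)) s ↔ x ∈ s ∨ ∃ k ∈ ks, x = f k := by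
  induction ks generalizing s with
  | nil => simp
  | cons k ks ih =>
    simp only [List.foldl_cons, ih, PySem.Set.mem_add, List.mem_cons]
    constructor
    · rintro ((h | h) | ⟨k', hk', h⟩)
      · exact Or.inl h
      · exact Or.inr ⟨k, Or.inl rfl, h⟩
      · exact Or.inr ⟨k', Or.inr hk', h⟩
    · rintro (h | ⟨k', (rfl | hk'), h⟩)
      · exact Or.inl (Or.inl h)
      · exact Or.inl (Or.inr h)
      · exact Or.inr ⟨k', hk', h⟩

lemma pv_mem_properPrefixes (aliases : List String) (x : String) :
    x ∈ pvProperPrefixes aliases ↔ ∃ t ∈ aliases, pvStrict x t := by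
  have main : ∀ (l : List String) (s : PySem.Set String),
      x ∈ l.foldl
        (fun s a =>
          (PySem.List.pyRange 0 (PySem.Str.len a)).foldl
            (fun s k => s.add (PySem.Str.slice a none (some k))) s) s
        ↔ x ∈ s ∨ ∃ t ∈ l, pvStrict x t := by
    intro l
    induction l with
    | nil => simp
    | cons a l ih =>
      intro s
      rw [List.foldl_cons, ih, pv_mem_fold_add]
      have hone : (∃ k ∈ PySem.List.pyRange 0 (PySem.Str.len a), x = PySem.Str.slice a none (some k))
          ↔ pvStrict x a := by
        rw [← pv_slice_iff]
        constructor
        · rintro ⟨k, hk, rfl⟩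
          obtain ⟨h0, h1⟩ := PySem.List.mem_pyRange_one.mp hk
          exact ⟨k, h0, h1, rfl⟩
        · rintro ⟨k, h0, h1, rfl⟩
          exact ⟨k, PySem.List.mem_pyRange_one.mpr ⟨h0, h1⟩, rfl⟩
      rw [hone]
      simp only [List.mem_cons]
      constructor
      · rintro ((h | h) | h)
        · exact Or.inl h
        · exact Or.inr ⟨a, Or.inl rfl, h⟩
        · obtain ⟨t, ht, hs⟩ := h
          exact Or.inr ⟨t, Or.inr ht, hs⟩
      · rintro (h | ⟨t, (rfl | ht), hs⟩)
        · exact Or.inl (Or.inl h)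
        · exact Or.inl (Or.inr hs)
        · exact Or.inr ⟨t, ht, hs⟩
  rw [pvProperPrefixes, main]
  simp

lemma pv_bad_iff (aliases : List String) (a : String) :
    pvBad (PySem.Set.ofList aliases) (pvCounts aliases) (pvProperPrefixes aliases) a = true
      ↔ pvBadP aliases a := by
  have hcounts : (pvCounts aliases).getD a 0 = (aliases.count a : Int) :=
    PySem.Dict.getD_counter aliases a
  rw [pvBad, pvBadP]
  simp only [Bool.or_eq_true, decide_eq_true_eq, List.any_eq_true, hcounts]
  have h1 : (1 : Int) < (aliases.count a : Int) ↔ 1 < aliases.count a := by exact_mod_cast Iff.rfl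
  rw [h1, pv_mem_properPrefixes]
  have h3 : (∃ k ∈ PySem.List.pyRange 0 (PySem.Str.len a),
        PySem.Str.slice a none (some k) ∈ PySem.Set.ofList aliases)
      ↔ ∃ t ∈ aliases, pvStrict t a := by
    constructor
    · rintro ⟨k, hk, hmem⟩
      obtain ⟨h0, h1'⟩ := PySem.List.mem_pyRange_one.mp hk
      refine ⟨PySem.Str.slice a none (some k), (PySem.Set.mem_ofList aliases _).mp hmem, ?_⟩
      exact (pv_slice_iff _ a).mp ⟨k, h0, h1', rfl⟩
    · rintro ⟨t, ht, hs⟩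
      obtain ⟨k, h0, h1', rfl⟩ := (pv_slice_iff t a).mpr hs
      exact ⟨k, PySem.List.mem_pyRange_one.mpr ⟨h0, h1'⟩, (PySem.Set.mem_ofList aliases _).mpr ht⟩
  rw [h3, or_assoc]

lemma pv_innerA_false (i : Int) (a : String) (l : List (Int × String)) :
    pvInnerA i a l = false ↔ ∃ p ∈ l, i ≠ p.1 ∧
      (PySem.Str.startswith a p.2 || PySem.Str.startswith p.2 a) = true := by
  induction l with
  | nil => simp [pvInnerA]
  | cons p l ih =>
    obtain ⟨j, other⟩ := p
    by_cases hij : i ≠ j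
    · by_cases hrel : (PySem.Str.startswith a other || PySem.Str.startswith other a) = true
      · have hfalse : pvInnerA i a ((j, other) :: l) = false := by
          show (if i ≠ j then if (PySem.Str.startswith a other || PySem.Str.startswith other a) = true then false else pvInnerA i a l else pvInnerA i a l) = false
          rw [if_pos hij, if_pos hrel]
        rw [hfalse]
        exact ⟨fun _ => ⟨(j, other), List.mem_cons_self, hij, hrel⟩, fun _ => rfl⟩
      · simp only [pvInnerA, if_pos hij, if_neg hrel, ih, List.mem_cons]
        constructor
        · rintro ⟨p, hp, h⟩; exact ⟨p, Or.inr hp, h⟩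
        · rintro ⟨p, (rfl | hp), h⟩
          · exact absurd h.2 hrel
          · exact ⟨p, hp, h⟩
    · simp only [pvInnerA, if_neg hij, ih, List.mem_cons]
      have hij' := not_not.mp hij
      subst hij'
      constructor
      · rintro ⟨p, hp, h⟩; exact ⟨p, Or.inr hp, h⟩
      · rintro ⟨p, (rfl | hp), h⟩
        · exact absurd rfl h.1
        · exact ⟨p, hp, h⟩

lemma pv_mem_enumerate (l : List String) (s j : Int) (t : String) :
    (j, t) ∈ PySem.List.enumerate l s ↔ ∃ n : Nat, ∃ _h : n < l.length, j = s + n ∧ l[n] = t := by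
  induction l generalizing s with
  | nil => simp [PySem.List.enumerate]
  | cons x l ih =>
    have hcons : PySem.List.enumerate (x :: l) s = (s, x) :: PySem.List.enumerate l (s + 1) := rfl
    rw [hcons]
    simp only [List.mem_cons, ih, Prod.mk.injEq]
    constructor
    · rintro (⟨rfl, rfl⟩ | ⟨n, hn, rfl, rfl⟩)
      · exact ⟨0, by simp⟩
      · exact ⟨n + 1, by simp only [List.length_cons]; omega, by push_cast; ring, by simp⟩
    · rintro ⟨n, hn, rfl, rfl⟩
      cases n with
      | zero => exact Or.inl ⟨by simp, by simp⟩
      | succ m =>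
        refine Or.inr ⟨m, by simp only [List.length_cons] at hn; omega, by push_cast; ring, by simp⟩

lemma pv_count_pair (l : List String) (a : String) (n : Nat) (hn : n < l.length) (ha : l[n] = a) :
    1 < l.count a ↔ ∃ m : Nat, ∃ _h : m < l.length, m ≠ n ∧ l[m] = a := by
  have hsplit : l = l.take n ++ a :: l.drop (n + 1) := by
    rw [← ha]
    conv_lhs => rw [← List.take_append_drop n l, List.drop_eq_getElem_cons hn]
  constructor
  · intro hcount
    rw [hsplit, List.count_append, List.count_cons_self] at hcount
    have hmem : a ∈ l.take n ∨ a ∈ l.drop (n + 1) := by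
      rcases Nat.lt_or_ge 0 ((l.take n).count a) with h | h
      · exact Or.inl (List.count_pos_iff.mp h)
      · have : 0 < (l.drop (n + 1)).count a := by omega
        exact Or.inr (List.count_pos_iff.mp this)
    rcases hmem with h | h
    · obtain ⟨i, hi, hia⟩ := List.mem_iff_getElem.mp h
      have hilen : i < n := by
        have := hi; simp only [List.length_take] at this; omega
      refine ⟨i, by omega, by omega, ?_⟩
      rw [← hia, List.getElem_take]
    · obtain ⟨i, hi, hia⟩ := List.mem_iff_getElem.mp h
      have hilen : n + 1 + i < l.length := by
        have := hi; simp only [List.length_drop] at this; omega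
      refine ⟨n + 1 + i, hilen, by omega, ?_⟩
      rw [← hia, List.getElem_drop]
  · rintro ⟨m, hm, hmn, hma⟩
    rw [hsplit, List.count_append, List.count_cons_self]
    rcases Nat.lt_or_ge m n with h | h
    · have : a ∈ l.take n := by
        rw [List.mem_iff_getElem]
        exact ⟨m, by simp only [List.length_take]; omega, by rw [List.getElem_take, hma]⟩
      have := List.count_pos_iff.mpr this
      omega
    · have hmn' : n + 1 ≤ m := by omega
      have : a ∈ l.drop (n + 1) := by
        rw [List.mem_iff_getElem]
        refine ⟨m - (n + 1), by simp only [List.length_drop]; omega, ?_⟩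
        rw [List.getElem_drop]
        have : n + 1 + (m - (n + 1)) = m := by omega
        simp only [this, hma]
      have := List.count_pos_iff.mpr this
      omega

lemma pv_pointwise (l : List String) (n : Nat) (hn : n < l.length) :
    pvInnerA ((0 : Int) + n) l[n] (PySem.List.enumerate l) = false ↔ pvBadP l l[n] := by
  rw [pv_innerA_false, pvBadP]
  constructor
  · rintro ⟨⟨j, t⟩, hp, hne, hrel⟩
    obtain ⟨m, hm, hj, hmt⟩ := (pv_mem_enumerate l 0 j t).mp hp
    have hmn : m ≠ n := by
      intro h
      exact hne (by rw [hj, h])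
    rw [Bool.or_eq_true] at hrel
    have hrel' : t.toList <+: l[n].toList ∨ l[n].toList <+: t.toList := by
      rcases hrel with h | h
      · exact Or.inl ((PySem.Chars.startswith_iff _ _).mp (by rwa [PySem.Str.startswith_eq] at h))
      · exact Or.inr ((PySem.Chars.startswith_iff _ _).mp (by rwa [PySem.Str.startswith_eq] at h))
    by_cases hta : t = l[n]
    · exact Or.inl ((pv_count_pair l l[n] n hn rfl).mpr ⟨m, hm, hmn, by rw [hmt, hta]⟩)
    · have hne' : t.toList ≠ l[n].toList := fun h => hta (String.toList_injective h)
      have htmem : t ∈ l := by rw [← hmt]; exact List.getElem_mem hm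
      rcases hrel' with h | h
      · refine Or.inr (Or.inr ⟨t, htmem, h, ?_⟩)
        rcases lt_or_eq_of_le h.length_le with hlt | heq
        · exact hlt
        · exact absurd (List.IsPrefix.eq_of_length h heq) hne'
      · refine Or.inr (Or.inl ⟨t, htmem, h, ?_⟩)
        rcases lt_or_eq_of_le h.length_le with hlt | heq
        · exact hlt
        · exact absurd (List.IsPrefix.eq_of_length h heq).symm hne'
  · rintro (hc | ⟨t, ht, hpre, hlt⟩ | ⟨t, ht, hpre, hlt⟩)
    · obtain ⟨m, hm, hmn, hma⟩ := (pv_count_pair l l[n] n hn rfl).mp hc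
      refine ⟨((0 : Int) + m, l[n]), (pv_mem_enumerate l 0 _ _).mpr ⟨m, hm, rfl, hma⟩, ?_, ?_⟩
      · intro h
        have : (n : Int) = (m : Int) := by omega
        exact hmn (by exact_mod_cast this.symm)
      · rw [Bool.or_eq_true]
        exact Or.inl (by rw [PySem.Str.startswith_eq]; exact (PySem.Chars.startswith_iff _ _).mpr (List.prefix_refl _))
    · obtain ⟨m, hm, hmt⟩ := List.mem_iff_getElem.mp ht
      have hmn : m ≠ n := by
        intro h
        subst h
        rw [hmt] at hlt
        omega
      refine ⟨((0 : Int) + m, t), (pv_mem_enumerate l 0 _ _).mpr ⟨m, hm, rfl, hmt⟩, ?_, ?_⟩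
      · intro h
        have : (n : Int) = (m : Int) := by omega
        exact hmn (by exact_mod_cast this.symm)
      · rw [Bool.or_eq_true]
        exact Or.inr (by rw [PySem.Str.startswith_eq]; exact (PySem.Chars.startswith_iff _ _).mpr hpre)
    · obtain ⟨m, hm, hmt⟩ := List.mem_iff_getElem.mp ht
      have hmn : m ≠ n := by
        intro h
        subst h
        rw [hmt] at hlt
        omega
      refine ⟨((0 : Int) + m, t), (pv_mem_enumerate l 0 _ _).mpr ⟨m, hm, rfl, hmt⟩, ?_, ?_⟩
      · intro h
        have : (n : Int) = (m : Int) := by omega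
        exact hmn (by exact_mod_cast this.symm)
      · rw [Bool.or_eq_true]
        exact Or.inl (by rw [PySem.Str.startswith_eq]; exact (PySem.Chars.startswith_iff _ _).mpr hpre)

lemma pv_fold_eq (l : List String) (P : Int × String → Bool) (Q : String → Bool) :
    ∀ (s : Int) (acc : List String × List String),
      (∀ n : Nat, (_h : n < l.length) → P ((s + n : Int), l[n]) = !Q l[n]) →
      (PySem.List.enumerate l s).foldl
          (fun acc p => if P p then (acc.1 ++ [p.2], acc.2) else (acc.1, acc.2 ++ [p.2])) acc
        = l.foldl
            (fun acc a => if Q a then (acc.1, acc.2 ++ [a]) else (acc.1 ++ [a], acc.2)) acc := by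
  induction l with
  | nil => intro s acc _; rfl
  | cons x l ih =>
    intro s acc h
    have hcons : PySem.List.enumerate (x :: l) s = (s, x) :: PySem.List.enumerate l (s + 1) := rfl
    rw [hcons, List.foldl_cons, List.foldl_cons]
    have h0 : P (s, x) = !Q x := by
      have := h 0 (by simp)
      simpa using this
    have hstep :
        (if P (s, x) then (acc.1 ++ [x], acc.2) else (acc.1, acc.2 ++ [x]))
          = (if Q x then (acc.1, acc.2 ++ [x]) else (acc.1 ++ [x], acc.2)) := by
      rw [h0]
      cases Q x <;> rfl
    rw [hstep]
    exact ih (s + 1) _ (fun n hn => by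
      have := h (n + 1) (by simp only [List.length_cons]; omega)
      have harith : s + ((n : Int) + 1) = s + 1 + n := by ring
      simpa [harith] using this)

-- ===== VERDICT (by name: the statement is the Claim_ definition above) =====
theorem validate_prefix_free_spec : Claim_equal_validate_prefix_free := by
  intro aliases _dom
  unfold Spec_validate_prefix_free validate_prefix_free validate_prefix_free_alt
  refine (pv_fold_eq aliases
    (fun p => pvInnerA p.1 p.2 (PySem.List.enumerate aliases))
    (pvBad (PySem.Set.ofList aliases) (pvCounts aliases) (pvProperPrefixes aliases))
    0 ([], []) ?_)
  intro n hn
  by_cases hb : pvBadP aliases aliases[n]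
  · have h1 : pvInnerA ((0 : Int) + n) aliases[n] (PySem.List.enumerate aliases) = false :=
      (pv_pointwise aliases n hn).mpr hb
    have h2 : pvBad (PySem.Set.ofList aliases) (pvCounts aliases) (pvProperPrefixes aliases) aliases[n] = true :=
      (pv_bad_iff aliases aliases[n]).mpr hb
    simp only [zero_add] at h1
    simp [h1, h2]
  · have h1 : pvInnerA ((0 : Int) + n) aliases[n] (PySem.List.enumerate aliases) = true := by
      have := mt (pv_pointwise aliases n hn).mp hb
      simpa using this
    have h2 : pvBad (PySem.Set.ofList aliases) (pvCounts aliases) (pvProperPrefixes aliases) aliases[n] = false := by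
      have := mt (pv_bad_iff aliases aliases[n]).mp hb
      simpa using this
    simp only [zero_add] at h1
    simp [h1, h2]
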